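-- pv_equiv track=rewrite | github.com/tudelft-cda-lab/FATE | python/generate_code.py | _array_initialize
-- ===== SOURCE A (Python) =====
-- def _array_initialize(features):
--     fs = [str(e) for e in features]
--     if len(fs) == 0:
--         return "{}"
--     count = 0
--     fs_per_line = 10
--     res = "{"
--     for i, e in enumerate(fs):
--         count += 1
--         res += e + ","
--         if i != len(features) - 1 and count % fs_per_line == 0:
--             res += "\n"
--     return res[:-1] + "}"
-- ===== SOURCE B (Python) =====
-- def _array_initialize(features):
--     fs = [str(e) for e in features]
--     if not fs:
--         return "{}"
--     lines = [",".join(fs[i:i + 10]) for i in range(0, len(fs), 10)]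
--     return "{" + ",\n".join(lines) + "}"
-- ===== Notes on version B (the rewrite author's own statement) =====
-- stated objective: simpler
-- what changed: Replaces the element-by-element accumulation with a running counter, a newline-conditional on every element, and a trailing-comma chop, by stringifying once, slicing into chunks of 10, joining each chunk with ',' and the chunks with ',\n', and wrapping in braces.
import Mathlib
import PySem

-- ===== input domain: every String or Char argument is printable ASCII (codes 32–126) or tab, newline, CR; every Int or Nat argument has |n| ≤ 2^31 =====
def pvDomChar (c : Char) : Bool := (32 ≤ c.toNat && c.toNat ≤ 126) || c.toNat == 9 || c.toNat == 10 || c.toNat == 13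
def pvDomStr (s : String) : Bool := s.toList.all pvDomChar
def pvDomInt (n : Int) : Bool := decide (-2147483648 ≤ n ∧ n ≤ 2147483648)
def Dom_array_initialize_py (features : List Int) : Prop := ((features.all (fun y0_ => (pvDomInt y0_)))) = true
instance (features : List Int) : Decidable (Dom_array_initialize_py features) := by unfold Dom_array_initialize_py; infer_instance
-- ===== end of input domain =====

-- B replaces A's per-element loop (counter + newline-conditional + trailing-comma chop)
-- by a chunk-into-slices-of-10-then-join computation; objective: simpler.


-- ===== PORT A =====
-- the loop body of A's 'for i, e in enumerate(fs)' (state: (count, res))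
def stepA (n : Int) (p : Int × String) (ie : Int × String) : Int × String :=
  let count := p.1 + 1
  let res := p.2 ++ ie.2 ++ ","
  let res := if ie.1 != n - 1 && PySem.Int.mod count 10 == 0 then res ++ "\n" else res
  (count, res)

def array_initialize_py (features : List Int) : String :=
  let fs := features.map (fun e => PySem.Int.toStr e)
  if fs.length == 0 then "{}"
  else
    let st := (PySem.List.enumerate fs).foldl (stepA (features.length : Int)) (0, "{")
    PySem.Str.slice st.2 none (some (-1)) ++ "}"

-- ===== PORT B =====
def array_initialize_py_alt (features : List Int) : String :=
  let fs := features.map (fun e => PySem.Int.toStr e)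
  if fs.length == 0 then "{}"
  else
    let lines := (PySem.List.pyRange 0 (fs.length : Int) 10).map
      (fun i => PySem.Str.join "," (PySem.List.slice fs (some i) (some (i + 10))))
    "{" ++ PySem.Str.join ",\n" lines ++ "}"

-- ===== PRECONDITION & SPEC =====
def Spec_array_initialize_py (features : List Int) (out : String) : Prop := out = array_initialize_py_alt features
instance (features : List Int) (out : String) : Decidable (Spec_array_initialize_py features out) := by unfold Spec_array_initialize_py; infer_instance

-- ===== CLAIM (what is proved, stated in full; the proofs are below) =====
def Claim_equal_array_initialize_py : Prop := ∀ (features : List Int), Dom_array_initialize_py features → Spec_array_initialize_py features (array_initialize_py features)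

-- ===== LEMMAS AND PROOFS =====

-- character-level trace of A's loop: each element contributes "e," plus a conditional newline
def Fc (n : Int) : List String → Int → List Char
  | [], _ => []
  | x :: xs, s =>
      x.toList ++ [','] ++ (if s != n - 1 && PySem.Int.mod (s + 1) 10 == 0 then ['\n'] else [])
        ++ Fc n xs (s + 1)

-- same trace without the trailing comma (no comma/newline after the last element)
def Gc : List String → Int → List Char
  | [], _ => []
  | [x], _ => x.toList
  | x :: y :: ys, s =>
      x.toList ++ [','] ++ (if PySem.Int.mod (s + 1) 10 == 0 then ['\n'] else [])
        ++ Gc (y :: ys) (s + 1)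

-- recursive form of B's chunking
def linesRec (fs : List String) : List String :=
  if h : fs = [] then [] else PySem.Str.join "," (fs.take 10) :: linesRec (fs.drop 10)
termination_by fs.length
decreasing_by
  cases fs with
  | nil => exact absurd rfl h
  | cons a l => simp [List.length_drop]

lemma mod10_eq (s : Int) : (PySem.Int.mod s 10 == 0) = decide (s % 10 = 0) := by
  have : PySem.Int.mod s 10 = s % 10 := by
    simp [PySem.Int.mod, Int.fmod_eq_emod]
  rw [this]
  by_cases h : s % 10 = 0 <;> simp [h]

lemma toList_comma : ("," : String).toList = [','] := rfl
lemma toList_commanl : (",\n" : String).toList = [',', '\n'] := rfl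
lemma toList_lbrace : ("{" : String).toList = ['{'] := rfl
lemma toList_rbrace : ("}" : String).toList = ['}'] := rfl

lemma join_toList_cons (x : String) (l : List String) (h : l ≠ []) :
    (PySem.Str.join "," (x :: l)).toList = x.toList ++ [','] ++ (PySem.Str.join "," l).toList := by
  cases l with
  | nil => exact absurd rfl h
  | cons y ys =>
    simp [PySem.Str.toList_join, PySem.Chars.join_cons_cons, toList_comma]

lemma foldA (n : Int) (xs : List String) : ∀ (s : Int) (r : String),
    (PySem.List.enumerate xs s).foldl (stepA n) (s, r)
      = (s + (xs.length : Int), String.ofList (r.toList ++ Fc n xs s)) := by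
  induction xs with
  | nil =>
    intro s r
    simp [PySem.List.enumerate_nil, Fc, String.ofList_toList]
  | cons x xs ih =>
    intro s r
    rw [PySem.List.enumerate_cons, List.foldl_cons]
    have hst : stepA n (s, r) (s, x)
        = (s + 1, if s != n - 1 && PySem.Int.mod (s + 1) 10 == 0
                  then r ++ x ++ "," ++ "\n" else r ++ x ++ ",") := by
      simp only [stepA]
    rw [hst]
    by_cases hc : (s != n - 1 && PySem.Int.mod (s + 1) 10 == 0) = true
    · rw [if_pos hc, ih]
      refine Prod.ext ?_ ?_
      · simp only [List.length_cons]
        push_cast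
        ring
      · simp only [Fc, hc, if_true]
        congr 1
        simp [String.toList_append, toList_comma]
    · rw [if_neg hc, ih]
      refine Prod.ext ?_ ?_
      · simp only [List.length_cons]
        push_cast
        ring
      · simp only [Fc, hc, if_false, Bool.false_eq_true]
        congr 1
        simp [String.toList_append, toList_comma]

lemma Fc_strip (n : Int) : ∀ (xs : List String) (s : Int), xs ≠ [] →
    s + (xs.length : Int) = n → Fc n xs s = Gc xs s ++ [','] := by
  intro xs
  induction xs with
  | nil => intro s h; exact absurd rfl h
  | cons x xs ih =>
    intro s _ hn
    cases xs with
    | nil =>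
      have hs : s = n - 1 := by simp at hn; omega
      simp [Fc, Gc, hs]
    | cons y ys =>
      have hne : (s != n - 1) = true := by
        simp at hn ⊢; omega
      have hrec := ih (s + 1) (by simp) (by simp at hn ⊢; omega)
      rw [Fc, Gc]
      simp only [hne, Bool.true_and]
      rw [hrec]
      simp

lemma chunkG : ∀ (r : Nat) (fs : List String) (s : Int), 1 ≤ r → r ≤ 10 →
    fs ≠ [] → s % 10 = 10 - (r : Int) →
    Gc fs s = (PySem.Str.join "," (fs.take r)).toList
      ++ (if fs.drop r = [] then [] else ',' :: '\n' :: Gc (fs.drop r) (s + (r : Int))) := by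
  intro r
  induction r with
  | zero => intro fs s h1; omega
  | succ r ih =>
    intro fs s _ h10 hne hs
    cases fs with
    | nil => exact absurd rfl hne
    | cons x xs =>
      cases xs with
      | nil =>
        have hx : Gc [x] s = x.toList := rfl
        simp [hx, List.take_succ_cons, PySem.Str.toList_join, PySem.Chars.join_singleton,
          List.drop_succ_cons]
      | cons y ys =>
        by_cases hr : r = 0
        · subst hr
          have hcond : (PySem.Int.mod (s + 1) 10 == 0) = true := by
            rw [mod10_eq]; simp; omega
          rw [Gc]
          simp only [hcond, if_true, List.take_succ_cons, List.drop_succ_cons,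
            List.take_zero, List.drop_zero]
          simp [PySem.Str.toList_join, PySem.Chars.join_singleton]
        · obtain ⟨r', rfl⟩ := Nat.exists_eq_succ_of_ne_zero hr
          have hcond : (PySem.Int.mod (s + 1) 10 == 0) = false := by
            rw [mod10_eq]; simp; push_cast at hs; omega
          have hrec := ih (y :: ys) (s + 1) (by omega) (by omega) (by simp)
            (by push_cast at hs; omega)
          have hcast : s + 1 + ((r' + 1 : Nat) : Int) = s + ((r' + 1 + 1 : Nat) : Int) := by
            push_cast; ring
          rw [Gc]
          simp only [hcond, if_false, Bool.false_eq_true]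
          rw [hrec, hcast]
          simp only [List.take_succ_cons, List.drop_succ_cons, Nat.succ_eq_add_one]
          rw [join_toList_cons x (y :: List.take r' ys) (by simp)]
          simp [List.append_assoc]

lemma Gc_join : ∀ (N : Nat) (fs : List String), fs.length ≤ N → fs ≠ [] →
    ∀ s : Int, s % 10 = 0 →
    Gc fs s = PySem.Chars.join [',', '\n'] ((linesRec fs).map String.toList) := by
  intro N
  induction N with
  | zero => intro fs hN hne; cases fs <;> simp_all
  | succ N ih =>
    intro fs hN hne s hs
    rw [chunkG 10 fs s (by omega) (by omega) hne (by push_cast; omega)]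
    rw [linesRec, dif_neg hne]
    by_cases hd : fs.drop 10 = []
    · rw [if_pos hd, hd, linesRec]
      simp [PySem.Chars.join_singleton]
    · rw [if_neg hd]
      have hlen : (fs.drop 10).length ≤ N := by
        have hfl : fs.length ≠ 0 := by simpa using hne
        have h10 : 10 < fs.length := by
          by_contra hc
          exact hd (List.drop_eq_nil_of_le (by omega))
        simp only [List.length_drop]
        omega
      have hrec := ih (fs.drop 10) hlen hd (s + 10) (by omega)
      have hten : s + ((10 : Nat) : Int) = s + 10 := by norm_num
      rw [hten, hrec, linesRec, dif_neg hd]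
      simp only [List.map_cons, PySem.Chars.join_cons_cons]
      simp [List.append_assoc]

lemma pyRange10_cons (n : Int) (h : 0 < n) :
    PySem.List.pyRange 0 n 10 = 0 :: (PySem.List.pyRange 0 (n - 10) 10).map (· + 10) := by
  rw [PySem.List.pyRange_of_pos _ _ (by norm_num : (0:Int) < 10),
      PySem.List.pyRange_of_pos _ _ (by norm_num : (0:Int) < 10)]
  rw [if_pos h]
  by_cases h10 : 0 < n - 10
  · rw [if_pos h10]
    have hm : ((n - 0 + 10 - 1) / 10).toNat = ((n - 10 - 0 + 10 - 1) / 10).toNat + 1 := by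
      omega
    rw [hm, List.range_succ_eq_map]
    simp only [List.map_cons, List.map_map]
    congr 1
  · rw [if_neg h10]
    have hm : ((n - 0 + 10 - 1) / 10).toNat = 1 := by omega
    rw [hm]
    simp

lemma slice_zero_ten (fs : List String) :
    PySem.List.slice fs (some 0) (some (0 + 10)) = fs.take 10 := by
  rw [PySem.List.slice_zero_start]
  norm_num
  rw [PySem.List.slice_to _ (by norm_num : (0:Int) ≤ 10)]
  norm_num
  simp

lemma slice_shift (fs : List String) (i : Int) (hi : 0 ≤ i) :
    PySem.List.slice fs (some (i + 10)) (some (i + 10 + 10))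
      = PySem.List.slice (fs.drop 10) (some i) (some (i + 10)) := by
  rw [PySem.List.slice_toNat _ (by omega) (by omega),
      PySem.List.slice_toNat _ (by omega) (by omega)]
  rw [List.drop_drop]
  congr 1
  · omega
  · congr 1
    omega

lemma linesB : ∀ (N : Nat) (fs : List String), fs.length ≤ N →
    (PySem.List.pyRange 0 (fs.length : Int) 10).map
      (fun i => PySem.Str.join "," (PySem.List.slice fs (some i) (some (i + 10))))
      = linesRec fs := by
  intro N
  induction N with
  | zero =>
    intro fs hN
    have : fs = [] := by cases fs <;> simp_all
    subst this
    rw [linesRec]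
    simp only [List.length_nil, Nat.cast_zero]
    rw [PySem.List.pyRange_of_pos _ _ (by norm_num : (0:Int) < 10)]
    simp
  | succ N ih =>
    intro fs hN
    by_cases hfs : fs = []
    · subst hfs
      rw [linesRec]
      simp only [List.length_nil, Nat.cast_zero]
      rw [PySem.List.pyRange_of_pos _ _ (by norm_num : (0:Int) < 10)]
      simp
    · have hn : 0 < fs.length := List.length_pos_iff.mpr hfs
      rw [pyRange10_cons _ (by exact_mod_cast hn)]
      rw [List.map_cons, List.map_map]
      rw [linesRec, dif_neg hfs]
      congr 1
      · rw [slice_zero_ten]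
      · by_cases h10 : fs.length ≤ 10
        · have hd : fs.drop 10 = [] := List.drop_eq_nil_of_le h10
          rw [hd, linesRec]
          simp only [dif_pos]
          have hnil : PySem.List.pyRange 0 ((fs.length : Int) - 10) 10 = [] := by
            rw [PySem.List.pyRange_of_pos _ _ (by norm_num : (0:Int) < 10)]
            rw [if_neg (by omega)]
            simp
          rw [hnil]
          simp
        · have hstep : ((fs.drop 10).length : Int) = (fs.length : Int) - 10 := by
            simp only [List.length_drop]
            omega
          have hmap :
              (PySem.List.pyRange 0 ((fs.length : Int) - 10) 10).map
                ((fun i => PySem.Str.join "," (PySem.List.slice fs (some i) (some (i + 10))))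
                  ∘ (· + 10))
              = (PySem.List.pyRange 0 (((fs.drop 10).length : Int)) 10).map
                (fun i => PySem.Str.join "," (PySem.List.slice (fs.drop 10) (some i) (some (i + 10)))) := by
            rw [hstep]
            apply List.map_congr_left
            intro a ha
            have hpos : 0 ≤ a := by
              rcases (PySem.List.mem_pyRange_iff_of_pos (by norm_num : (0:Int) < 10) a).mp ha
                with ⟨h1, _⟩
              exact h1
            simp only [Function.comp]
            congr 1
            exact slice_shift fs a hpos
          rw [hmap, ih (fs.drop 10) (by simp only [List.length_drop]; omega)]

theorem main_eq (features : List Int) :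
    array_initialize_py features = array_initialize_py_alt features := by
  by_cases hf : features = []
  · subst hf
    rfl
  · have hne : features.map (fun e => PySem.Int.toStr e) ≠ [] := by simpa using hf
    have hlen0 : ((features.map (fun e => PySem.Int.toStr e)).length == 0) = false := by
      simp [hf]
    refine String.toList_inj.mp ?_
    simp only [array_initialize_py, array_initialize_py_alt, hlen0, Bool.false_eq_true,
      if_false]
    rw [foldA]
    simp only [String.toList_append, PySem.Str.toList_join, toList_rbrace, toList_lbrace,
      toList_commanl]
    rw [PySem.Str.slice_to_neg_one]
    rw [Fc_strip (features.length : Int) _ 0 hne (by simp)]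
    rw [linesB (features.map (fun e => PySem.Int.toStr e)).length _ le_rfl]
    rw [← Gc_join (features.map (fun e => PySem.Int.toStr e)).length _ le_rfl hne 0
      (by norm_num)]
    rw [String.toList_ofList]
    rw [show (['{'] ++ (Gc (features.map fun e => PySem.Int.toStr e) 0 ++ [','])) =
      (['{'] ++ Gc (features.map fun e => PySem.Int.toStr e) 0) ++ [','] from by simp]
    rw [List.dropLast_concat]

-- ===== VERDICT (by name: the statement is the Claim_ definition above) =====
theorem array_initialize_py_spec : Claim_equal_array_initialize_py := by
  intro features _
  unfold Spec_array_initialize_py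
  exact main_eq features
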